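-- pv_equiv track=rewrite | github.com/djordje200179/UniversityAssignments | P1/4-3.py | obrada
-- ===== SOURCE A (Python) =====
-- def obrada(rijeci):
--     nova = ''
--
--     for rijec in rijeci:
--         najduza = ''
--         privremena = ''
--
--         for slovo in rijec:
--             if slovo.isalpha() and slovo.islower():
--                 privremena += slovo
--             else:
--                 if len(privremena) >= len(najduza):
--                     najduza = privremena
--
--                 privremena = ''
--
--         if len(privremena) >= len(najduza):
--             najduza = privremena
--
--         nova += najduza
--
--     return nova
-- ===== SOURCE B (Python) =====
-- def obrada(rijeci):
--     def is_low(c):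
--         return c.isalpha() and c.islower()
--
--     def best_run(s):
--         # extract maximal lowercase segments, keep the best (last wins on ties)
--         best = ''
--         rest = s
--         while rest:
--             if is_low(rest[0]):
--                 k = 1
--                 while k < len(rest) and is_low(rest[k]):
--                     k += 1
--                 seg, rest = rest[:k], rest[k:]
--                 if len(seg) >= len(best):
--                     best = seg
--             else:
--                 rest = rest[1:]
--         return best
--
--     return ''.join(map(best_run, rijeci))
-- ===== Notes on version B (the rewrite author's own statement) =====
-- stated objective: alternative
-- what changed: Instead of A's char-by-char scan carrying two string accumulators per word, B extracts each maximal lowercase segment in one slice (find its boundary, cut it off) and keeps the best segment with the same >= last-wins tie rule, joining the per-word winners at the end.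
import Mathlib
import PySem

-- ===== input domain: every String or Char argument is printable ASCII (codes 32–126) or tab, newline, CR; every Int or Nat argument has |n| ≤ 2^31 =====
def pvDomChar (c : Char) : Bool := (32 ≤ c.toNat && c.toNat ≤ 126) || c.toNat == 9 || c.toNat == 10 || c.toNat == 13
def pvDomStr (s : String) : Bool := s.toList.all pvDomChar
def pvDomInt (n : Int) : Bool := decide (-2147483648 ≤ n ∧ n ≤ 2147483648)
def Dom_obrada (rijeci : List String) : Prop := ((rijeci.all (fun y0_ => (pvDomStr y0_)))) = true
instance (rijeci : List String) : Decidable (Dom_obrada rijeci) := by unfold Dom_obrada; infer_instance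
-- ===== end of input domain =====

-- B replaces A's char-by-char scan with two per-word string accumulators by slicing off
-- whole maximal lowercase segments and keeping the best one (alternative decomposition, same cost).


-- ===== PORT A =====
-- inner loop of A: state (najduza, privremena), then the trailing flush
def obradaWordA (cs : List Char) : List Char :=
  let st := cs.foldl
    (fun (s : List Char × List Char) slovo =>
      if PySem.Chars.isalpha slovo && PySem.Chars.islower slovo then
        (s.1, s.2 ++ [slovo])
      else
        (if s.1.length ≤ s.2.length then s.2 else s.1, []))
    ([], [])
  if st.1.length ≤ st.2.length then st.2 else st.1

def obrada (rijeci : List String) : String :=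
  String.mk (rijeci.foldl (fun nova rijec => nova ++ obradaWordA rijec.toList) [])

-- ===== PORT B =====
def pvLow (c : Char) : Bool := PySem.Chars.isalpha c && PySem.Chars.islower c

-- B's while loop: cut off the leading maximal lowercase segment (or one non-lowercase char)
def bestLoop (best rest : List Char) : List Char :=
  match rest with
  | [] => best
  | c :: r =>
    if pvLow c then
      bestLoop (if best.length ≤ (c :: r.takeWhile pvLow).length
                then c :: r.takeWhile pvLow else best)
               (r.dropWhile pvLow)
    else bestLoop best r
  termination_by rest.length
  decreasing_by
  · exact Nat.lt_succ_of_le (List.length_dropWhile_le pvLow r)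
  · exact Nat.lt_succ_self r.length

def obrada_alt (rijeci : List String) : String :=
  String.mk (PySem.Chars.join [] (rijeci.map (fun rijec => bestLoop [] rijec.toList)))

-- ===== PRECONDITION & SPEC =====
def Spec_obrada (rijeci : List String) (out : String) : Prop := out = obrada_alt rijeci
instance (rijeci : List String) (out : String) : Decidable (Spec_obrada rijeci out) := by unfold Spec_obrada; infer_instance

-- ===== CLAIM (what is proved, stated in full; the proofs are below) =====
def Claim_equal_obrada : Prop := ∀ (rijeci : List String), Dom_obrada rijeci → Spec_obrada rijeci (obrada rijeci)

-- ===== LEMMAS AND PROOFS =====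

-- 'choose' is the shared >= update rule (ties go to the new segment)
def pvChoose (b s : List Char) : List Char := if b.length ≤ s.length then s else b

theorem pvChoose_nil (b : List Char) : pvChoose b [] = b := by
  cases b <;> simp [pvChoose]

theorem bestLoop_cons_neg (b : List Char) (c : Char) (r : List Char) (h : ¬ pvLow c = true) :
    bestLoop b (c :: r) = bestLoop b r := by
  simp [bestLoop, h]

-- B's loop absorbs the leading segment of its remaining input
theorem bestLoop_absorb (rest b : List Char) :
    bestLoop b rest = bestLoop (pvChoose b (rest.takeWhile pvLow)) (rest.dropWhile pvLow) := by
  cases rest with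
  | nil => simp [List.takeWhile, List.dropWhile, pvChoose_nil, bestLoop]
  | cons c r =>
    by_cases h : pvLow c = true
    · simp only [bestLoop, h, if_true, List.takeWhile_cons_of_pos, List.dropWhile_cons_of_pos,
        pvChoose, List.length_cons]
      rfl
    · rw [bestLoop_cons_neg b c r h]
      simp [h, pvChoose_nil, bestLoop_cons_neg _ c r h]

-- A's scan with pending state (naj, priv) equals B's loop started past that state
theorem scan_eq_bestLoop (cs : List Char) (naj priv : List Char) :
    (let st := cs.foldl
        (fun (s : List Char × List Char) slovo =>
          if PySem.Chars.isalpha slovo && PySem.Chars.islower slovo then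
            (s.1, s.2 ++ [slovo])
          else
            (if s.1.length ≤ s.2.length then s.2 else s.1, []))
        (naj, priv);
      if st.1.length ≤ st.2.length then st.2 else st.1)
    = bestLoop (pvChoose naj (priv ++ cs.takeWhile pvLow)) (cs.dropWhile pvLow) := by
  induction cs generalizing naj priv with
  | nil => simp [bestLoop, pvChoose]
  | cons c r ih =>
    by_cases h : pvLow c = true
    · have h' : (PySem.Chars.isalpha c && PySem.Chars.islower c) = true := h
      simp only [List.foldl_cons, h', if_pos, List.takeWhile_cons, List.dropWhile_cons, h]
      rw [ih naj (priv ++ [c])]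
      simp
    · have h' : (PySem.Chars.isalpha c && PySem.Chars.islower c) = false := by
        simpa [pvLow] using h
      simp only [List.foldl_cons, h', Bool.false_eq_true, if_false, List.takeWhile_cons,
        List.dropWhile_cons, h]
      rw [ih (if naj.length ≤ priv.length then priv else naj) [],
        bestLoop_cons_neg _ c r h, bestLoop_absorb r]
      simp [pvChoose]

theorem wordA_eq_bestLoop (cs : List Char) : obradaWordA cs = bestLoop [] cs := by
  rw [obradaWordA, scan_eq_bestLoop cs [] []]
  simp only [List.nil_append]
  exact (bestLoop_absorb cs []).symm

theorem join_nil_cons (x : List Char) (xs : List (List Char)) :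
    PySem.Chars.join [] (x :: xs) = x ++ PySem.Chars.join [] xs := by
  cases xs with
  | nil => simp [PySem.Chars.join_singleton, PySem.Chars.join_nil]
  | cons y ys => simp [PySem.Chars.join_cons_cons]

theorem outer_foldl (f : String → List Char) (ws : List String) (acc : List Char) :
    ws.foldl (fun nova w => nova ++ f w) acc
      = acc ++ PySem.Chars.join [] (ws.map f) := by
  induction ws generalizing acc with
  | nil => simp [PySem.Chars.join_nil]
  | cons w ws ih =>
    simp only [List.foldl_cons, List.map_cons, join_nil_cons]
    rw [ih]
    simp

-- ===== VERDICT (by name: the statement is the Claim_ definition above) =====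
theorem obrada_spec : Claim_equal_obrada := by
  intro rijeci _
  show obrada rijeci = obrada_alt rijeci
  unfold obrada obrada_alt
  rw [outer_foldl (fun w => obradaWordA w.toList)]
  simp [wordA_eq_bestLoop]
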